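-- pv_equiv track=rewrite | github.com/SergeyChernov1995/deal-or-no-deal | deal_or_nd.py | until_next_offer
-- ===== SOURCE A (Python) =====
-- def until_next_offer(qq):
--     l = 0
--     while True:
--         qq-=1
--         l+=1
--         if (qq in bank):
--             break
--     return l
--
-- bank = [16, 13, 10, 7, 4, 2]
-- ===== SOURCE B (Python) =====
-- bank = [16, 13, 10, 7, 4, 2]
--
-- def until_next_offer(qq):
--     # bank is given largest-first: the first value below qq is the one
--     # A's decrement loop would reach, after qq - b decrements.
--     for b in bank:
--         if b < qq:
--             return qq - b
--     raise ValueError("no bank value below qq")  # A loops forever here (qq <= 2)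
-- ===== Notes on version B (the rewrite author's own statement) =====
-- stated objective: faster
-- what changed: B replaces A's one-by-one decrement loop by a direct scan of the six bank constants: it finds the largest bank value b below qq and returns qq - b in one subtraction.
-- outside the precondition, e.g. on until_next_offer(2): A does not finish within the time limit, B raises ValueError
import Mathlib
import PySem

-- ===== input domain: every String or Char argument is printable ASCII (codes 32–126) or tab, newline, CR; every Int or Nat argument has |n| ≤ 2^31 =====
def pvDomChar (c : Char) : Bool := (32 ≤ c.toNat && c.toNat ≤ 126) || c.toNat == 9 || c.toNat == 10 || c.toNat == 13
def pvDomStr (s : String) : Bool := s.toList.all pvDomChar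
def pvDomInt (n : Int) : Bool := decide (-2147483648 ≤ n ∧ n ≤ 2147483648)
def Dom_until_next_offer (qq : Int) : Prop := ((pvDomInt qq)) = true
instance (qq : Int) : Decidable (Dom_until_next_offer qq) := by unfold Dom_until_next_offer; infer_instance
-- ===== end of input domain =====

-- B replaces A's one-by-one decrement loop by a direct scan of the six bank
-- constants, returning qq - b for the largest bank value b below qq (faster).

def pvBank : List Int := [16, 13, 10, 7, 4, 2]

-- ===== PORT A =====
-- A's `while True` loop, decrementing qq until it lies in bank; the fuel
-- qq.toNat only makes the loop total in Lean (it is never exhausted on Pre_).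
def untilGo : Nat → Int → Int → Int
  | 0, _, l => l
  | f + 1, qq, l =>
    let qq' := qq - 1
    let l' := l + 1
    if pvBank.contains qq' then l' else untilGo f qq' l'

def until_next_offer (qq : Int) : Int := untilGo qq.toNat qq 0

-- ===== PORT B =====
def until_next_offer_alt (qq : Int) : Int :=
  match pvBank.find? (fun b => decide (b < qq)) with
  | some b => qq - b
  | none => 0  -- Python B raises ValueError here; outside Pre_

-- ===== PRECONDITION & SPEC =====
-- For qq ≤ 2 there is no bank value below qq: A's loop never terminates, so
-- those inputs are excluded (B raises ValueError there).
def Pre_until_next_offer (qq : Int) : Prop := 3 ≤ qq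
instance (qq : Int) : Decidable (Pre_until_next_offer qq) := by unfold Pre_until_next_offer; infer_instance
def pvWitness_until_next_offer : Int := (7)
def Spec_until_next_offer (qq : Int) (out : Int) : Prop := out = until_next_offer_alt qq
instance (qq : Int) (out : Int) : Decidable (Spec_until_next_offer qq out) := by unfold Spec_until_next_offer; infer_instance

-- ===== CLAIM (what is proved, stated in full; the proofs are below) =====
def Claim_equal_until_next_offer : Prop := ∀ (qq : Int), Dom_until_next_offer qq → Pre_until_next_offer qq → Spec_until_next_offer qq (until_next_offer qq)

-- ===== LEMMAS AND PROOFS =====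

-- For qq = 17 + n the loop stops after n + 1 steps (at bank value 16).
theorem untilGo_ge (n : Nat) : ∀ (l : Int) (f : Nat), n + 1 ≤ f →
    untilGo f (17 + (n : Int)) l = l + (n : Int) + 1 := by
  induction n with
  | zero =>
    intro l f hf
    obtain ⟨m, rfl⟩ : ∃ m, f = m + 1 := ⟨f - 1, by omega⟩
    simp [untilGo, pvBank]
  | succ n ih =>
    intro l f hf
    obtain ⟨m, rfl⟩ : ∃ m, f = m + 1 := ⟨f - 1, by omega⟩
    have hnot : pvBank.contains (17 + ((n : Int) + 1) - 1) = false := by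
      simp [pvBank]
      omega
    rw [show ((n : Nat) + 1 : Nat) = n + 1 from rfl] at *
    simp only [untilGo]
    rw [show ((↑(n + 1) : Int)) = (n : Int) + 1 by push_cast; ring] at *
    simp only [show (17 : Int) + ((n : Int) + 1) - 1 = 17 + (n : Int) by ring] at *
    rw [hnot]
    simp only [Bool.false_eq_true, if_false]
    rw [ih (l + 1) m (by omega)]
    ring

theorem alt_ge (qq : Int) (h : 17 ≤ qq) : until_next_offer_alt qq = qq - 16 := by
  have h16 : (decide ((16 : Int) < qq)) = true := by simp; omega
  simp [until_next_offer_alt, pvBank, h16]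

-- ===== VERDICT (by name: the statement is the Claim_ definition above) =====
theorem until_next_offer_spec : Claim_equal_until_next_offer := by
  intro qq _ hpre
  unfold Spec_until_next_offer
  by_cases hbig : 17 ≤ qq
  · have hn : qq = 17 + ((qq - 17).toNat : Int) := by omega
    have hf : (qq - 17).toNat + 1 ≤ qq.toNat := by omega
    unfold until_next_offer
    rw [alt_ge qq hbig]
    have key := untilGo_ge (qq - 17).toNat 0 qq.toNat hf
    rw [← hn] at key
    rw [key]
    omega
  · have h1 : 3 ≤ qq := hpre
    have h2 : qq ≤ 16 := by omega
    interval_cases qq <;> decide
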